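-- pv_equiv track=rewrite | github.com/artyomshutoff/lstu_informatics_2semestr | 4. Контест на разные лёгкие задачи/I. Комментарии.py | remove_blank_lines
-- ===== SOURCE A (Python) =====
-- def remove_blank_lines(text):
--     prev_is_new_line = True
--
--     text_new = ''
--     for c in text:
--         if c == '\n':
--             prev_is_new_line = True
--         else:
--             if prev_is_new_line and text_new != '':
--                 text_new += '\n'
--             text_new += c
--             prev_is_new_line = False
--
--     return text_new
-- ===== SOURCE B (Python) =====
-- def remove_blank_lines(text):
--     return '\n'.join(filter(None, text.split('\n')))
-- ===== Notes on version B (the rewrite author's own statement) =====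
-- stated objective: idiomatic
-- what changed: Replaces A's per-character state-machine scan (prev_is_new_line flag, result built one character at a time) with a split-on-newline / filter-out-empty-lines / join-with-newline pipeline over whole lines.
import Mathlib
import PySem

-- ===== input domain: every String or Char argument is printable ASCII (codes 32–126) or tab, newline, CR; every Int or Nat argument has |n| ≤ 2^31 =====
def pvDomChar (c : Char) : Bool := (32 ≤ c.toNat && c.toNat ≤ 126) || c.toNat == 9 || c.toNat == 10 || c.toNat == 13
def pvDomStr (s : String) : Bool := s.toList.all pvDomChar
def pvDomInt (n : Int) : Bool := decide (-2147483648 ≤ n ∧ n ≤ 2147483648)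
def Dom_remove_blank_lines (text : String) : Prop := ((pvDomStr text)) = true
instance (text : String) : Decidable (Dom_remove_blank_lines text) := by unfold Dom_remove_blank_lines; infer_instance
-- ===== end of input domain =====

-- B replaces A's per-character state-machine scan by a split('\n') / filter non-empty / join('\n') pipeline (objective: idiomatic; same value everywhere).

-- ===== PORT A =====
-- literal transliteration of A's character loop: state = (prev_is_new_line, text_new as List Char)
def remove_blank_lines (text : String) : String :=
  String.ofList
    (text.toList.foldl
      (fun (s : Bool × List Char) c =>
        if c = '\n' then (true, s.2)
        else (false, s.2 ++ (if s.1 ∧ s.2 ≠ [] then ['\n'] else []) ++ [c]))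
      (true, [])).2

-- ===== PORT B =====
-- text.split('\n') → List.splitOn; filter(None, …) → filter (· ≠ []); '\n'.join → List.intercalate
def remove_blank_lines_alt (text : String) : String :=
  String.ofList (List.intercalate ['\n'] ((text.toList.splitOn '\n').filter (fun l => l ≠ [])))

-- ===== PRECONDITION & SPEC =====
def Spec_remove_blank_lines (text : String) (out : String) : Prop := out = remove_blank_lines_alt text
instance (text : String) (out : String) : Decidable (Spec_remove_blank_lines text out) := by unfold Spec_remove_blank_lines; infer_instance

-- ===== CLAIM (what is proved, stated in full; the proofs are below) =====
def Claim_equal_remove_blank_lines : Prop := ∀ (text : String), Dom_remove_blank_lines text → Spec_remove_blank_lines text (remove_blank_lines text)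

-- ===== LEMMAS AND PROOFS =====

-- A's loop step
def rblStep (s : Bool × List Char) (c : Char) : Bool × List Char :=
  if c = '\n' then (true, s.2)
  else (false, s.2 ++ (if s.1 ∧ s.2 ≠ [] then ['\n'] else []) ++ [c])

-- what A's loop appends after the current accumulator, given prev flag and whether acc ≠ []
def rblTail : List Char → Bool → Bool → List Char
  | [], _, _ => []
  | c :: t, prev, ne =>
    if c = '\n' then rblTail t true ne
    else (if prev ∧ ne then ['\n'] else []) ++ c :: rblTail t false true

-- B's value on a char list
def rblJ (cs : List Char) : List Char :=
  List.intercalate ['\n'] ((cs.splitOn '\n').filter (fun l => l ≠ []))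

def rblSep (x : List Char) : List Char := if x = [] then [] else '\n' :: x

lemma rbl_loop_eq_tail (cs : List Char) : ∀ (prev : Bool) (acc : List Char),
    (cs.foldl rblStep (prev, acc)).2 = acc ++ rblTail cs prev (decide (acc ≠ [])) := by
  induction cs with
  | nil => intro prev acc; simp [rblTail]
  | cons c t ih =>
    intro prev acc
    by_cases hc : c = '\n'
    · simp [rblStep, rblTail, hc, ih]
    · simp only [List.foldl_cons, rblStep, rblTail, hc, if_false]
      rw [ih]
      by_cases hp : prev = true ∧ acc ≠ []
      · simp [hp]
      · have : ¬ (prev = true ∧ decide (acc ≠ []) = true) := by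
          intro ⟨h1, h2⟩; exact hp ⟨h1, of_decide_eq_true h2⟩
        simp [hp]

lemma rbl_splitOn_ne_nil (cs : List Char) : cs.splitOn '\n' ≠ [] :=
  List.splitOnP_ne_nil _ cs

lemma rbl_intercalate_cons (x : List Char) (xs : List (List Char)) :
    List.intercalate ['\n'] (x :: xs) =
      x ++ (if xs = [] then [] else '\n' :: List.intercalate ['\n'] xs) := by
  cases xs <;> simp [List.intercalate, List.intersperse]

lemma rbl_tail_characterization (cs : List Char) :
    rblTail cs true false = rblJ cs ∧
    rblTail cs true true = rblSep (rblJ cs) ∧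
    rblTail cs false true =
      (cs.splitOn '\n').headI ++
        rblSep (List.intercalate ['\n'] (((cs.splitOn '\n').tail).filter (fun l => l ≠ []))) := by
  induction cs with
  | nil => refine ⟨?_, ?_, ?_⟩ <;> simp [rblTail, rblJ, rblSep, List.splitOn, List.splitOnP_nil, List.intercalate]
  | cons c t ih =>
    obtain ⟨ih1, ih2, ih3⟩ := ih
    by_cases hc : c = '\n'
    · subst hc
      have hs : ('\n' :: t).splitOn '\n' = [] :: t.splitOn '\n' := by
        simp [List.splitOn, List.splitOnP_cons]
      have hJ : rblJ ('\n' :: t) = rblJ t := by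
        simp [rblJ, hs]
      refine ⟨?_, ?_, ?_⟩
      · simp only [rblTail, hJ]
        -- rblTail t true false = rblJ t, but here ne stays false
        exact ih1
      · simp only [rblTail, hJ]; exact ih2
      · simp only [rblTail, hs]
        simpa [rblJ] using ih2
    · obtain ⟨h, tl, hsplit⟩ : ∃ h tl, t.splitOn '\n' = h :: tl := by
        cases hx : t.splitOn '\n' with
        | nil => exact absurd hx (rbl_splitOn_ne_nil t)
        | cons a b => exact ⟨a, b, rfl⟩
      have hs : (c :: t).splitOn '\n' = (c :: h) :: tl := by
        simp [List.splitOn, List.splitOnP_cons, hc, List.splitOn] at hsplit ⊢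
        rw [hsplit]; rfl
      have hJc : rblJ (c :: t) =
          (c :: h) ++ rblSep (List.intercalate ['\n'] (tl.filter (fun l => l ≠ []))) := by
        simp only [rblJ, hs, List.filter_cons, decide_eq_true (by simp : (c :: h) ≠ [])]
        rw [if_pos trivial, rbl_intercalate_cons]
        cases hf : tl.filter (fun l => l ≠ []) with
        | nil => simp [rblSep, List.intercalate]
        | cons a b =>
          have ha : a ≠ [] := by
            have hm : a ∈ tl.filter (fun l => l ≠ []) := hf ▸ List.mem_cons_self
            simpa using (List.mem_filter.mp hm).2
          have hne : List.intercalate ['\n'] (a :: b) ≠ [] := by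
            rw [rbl_intercalate_cons]
            cases a with
            | nil => exact absurd rfl ha
            | cons x xs => simp
          simp [rblSep, hne]
      have h3' : rblTail t false true =
          h ++ rblSep (List.intercalate ['\n'] (tl.filter (fun l => l ≠ []))) := by
        rw [ih3, hsplit]; rfl
      refine ⟨?_, ?_, ?_⟩
      · simp only [rblTail, if_neg hc]
        simp [h3', hJc]
      · simp only [rblTail, if_neg hc]
        rw [h3', hJc]
        simp [rblSep]
      · simp only [rblTail, if_neg hc]
        rw [h3', hs]
        simp

-- ===== VERDICT (by name: the statement is the Claim_ definition above) =====
theorem remove_blank_lines_spec : Claim_equal_remove_blank_lines := by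
  intro text _
  show _ = _
  unfold remove_blank_lines remove_blank_lines_alt
  have hfold : (text.toList.foldl
      (fun (s : Bool × List Char) c =>
        if c = '\n' then (true, s.2)
        else (false, s.2 ++ (if s.1 ∧ s.2 ≠ [] then ['\n'] else []) ++ [c]))
      (true, [])) = text.toList.foldl rblStep (true, []) := rfl
  rw [hfold]
  have h1 := rbl_loop_eq_tail text.toList true []
  simp only [ne_eq, not_true_eq_false, decide_false] at h1
  rw [h1, (rbl_tail_characterization text.toList).1]
  rfl
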